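-- pv_equiv track=rewrite | github.com/hypergraphman/Masha_EGE_23 | task19-21/1k-fox.py | f
-- ===== SOURCE A (Python) =====
-- win = 375
--
-- def f(a, c, m):
--     if a >= win:
--         return c % 2 == m % 2
--     if c == m:
--         return False
--     moves = [f(a + 1, c + 1, m),
--              f(a + 3, c + 1, m),
--              f(a * 3, c + 1, m)]
--     return any(moves) if (c + 1) % 2 == m % 2 else all(moves)
-- ===== SOURCE B (Python) =====
-- def f(a, c, m):
--     win = 375
--     frontiers = [[a]]
--     cc = c
--     while any(x < win for x in frontiers[-1]) and cc != m:
--         nxt = []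
--         seen = set()
--         for x in frontiers[-1]:
--             if x < win:
--                 for y in (x + 1, x + 3, x * 3):
--                     if y not in seen:
--                         seen.add(y)
--                         nxt.append(y)
--         frontiers.append(nxt)
--         cc += 1
--     vals = {}
--     for x in frontiers[-1]:
--         vals[x] = (cc % 2 == m % 2) if x >= win else False
--     for front in reversed(frontiers[:-1]):
--         cc -= 1
--         want_any = (cc + 1) % 2 == m % 2
--         new = {}
--         for x in front:
--             if x >= win:
--                 new[x] = cc % 2 == m % 2
--             elif cc == m:
--                 new[x] = False
--             else:
--                 r1, r2, r3 = vals[x + 1], vals[x + 3], vals[x * 3]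
--                 new[x] = (r1 or r2 or r3) if want_any else (r1 and r2 and r3)
--         vals = new
--     return vals[a]
-- ===== Notes on version B (the rewrite author's own statement) =====
-- stated objective: alternative
-- what changed: Replaced the plain triple-branching recursion with an iterative dynamic programme on (state, cost) levels: a forward pass collects the distinct reachable positions per move level, a backward pass evaluates each distinct state once, instead of once per path of A's 3^depth tree.
-- outside the precondition, e.g. on f(0, 0, 920): A does not finish within the time limit, B returns False
import Mathlib
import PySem

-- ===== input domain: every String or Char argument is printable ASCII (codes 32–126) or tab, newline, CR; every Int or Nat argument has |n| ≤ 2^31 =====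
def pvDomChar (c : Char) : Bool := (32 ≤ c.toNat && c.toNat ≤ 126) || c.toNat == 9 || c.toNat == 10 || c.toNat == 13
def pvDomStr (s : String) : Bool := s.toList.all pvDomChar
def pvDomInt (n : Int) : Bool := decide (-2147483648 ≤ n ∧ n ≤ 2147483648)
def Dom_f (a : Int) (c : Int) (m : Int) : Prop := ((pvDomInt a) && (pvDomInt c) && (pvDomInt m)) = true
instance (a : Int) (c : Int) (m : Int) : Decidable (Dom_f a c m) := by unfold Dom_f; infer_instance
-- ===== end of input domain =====

-- B replaces A's triple-branching recursion by an iterative level-by-level dynamic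
-- programme: a forward pass collects the distinct reachable states per level, a backward
-- pass computes each level's values once (objective: alternative).

-- ===== PORT A =====
-- Literal port of A's triple-branching recursion.  The fuel (m - c).toNat + 375 only makes
-- the recursion structurally total; on every Pre_f input it is never exhausted (with a ≥ 1
-- every move strictly increases a towards 375, and with c ≤ m the recursion stops at c = m).
def fGo (m : Int) : Int → Int → Nat → Bool
  | a, c, fuel =>
    if a ≥ 375 then decide (c % 2 = m % 2)
    else if c = m then false
    else
      match fuel with
      | 0 => false
      | fuel + 1 =>
        let r1 := fGo m (a + 1) (c + 1) fuel
        let r2 := fGo m (a + 3) (c + 1) fuel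
        let r3 := fGo m (a * 3) (c + 1) fuel
        if (c + 1) % 2 = m % 2 then r1 || r2 || r3 else r1 && r2 && r3

def f (a : Int) (c : Int) (m : Int) : Bool := fGo m a c ((m - c).toNat + 375)

-- ===== PORT B =====
-- Port of B's forward pass.  The inner 'seen'-set/append loop over the three moves of each
-- non-terminal state is exactly PySem.Set.add on the accumulated list (first-seen order).
def childStep (acc : List Int) (x : Int) : List Int :=
  if x < 375 then
    PySem.Set.add (PySem.Set.add (PySem.Set.add acc (x + 1)) (x + 3)) (x * 3)
  else acc

def nextFrontier (front : List Int) : List Int := front.foldl childStep []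

-- The while loop of B's forward pass; the fuel only makes the loop structurally total
-- (on Pre_f inputs the loop's own exit condition fires first).
def fwdB (m : Int) : Nat → List Int → Int → List (List Int) × Int
  | fuel, cur, cc =>
    if (∃ x ∈ cur, x < 375) ∧ cc ≠ m then
      match fuel with
      | 0 => ([cur], cc)
      | fuel + 1 =>
        let res := fwdB m fuel (nextFrontier cur) (cc + 1)
        (cur :: res.1, res.2)
    else ([cur], cc)

-- B's backward pass: values of the last (all-terminal) level …
def lastVals (m cc : Int) (front : List Int) : PySem.Dict Int Bool :=
  front.foldl
    (fun d x => d.insert x (if x ≥ 375 then decide (cc % 2 = m % 2) else false))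
    PySem.Dict.empty

-- … and one backward step folding a level against the next level's values
-- (vals[x+1] etc. are read with getD false; the keys are always present, see back_correct below).
def backStep (m cc : Int) (front : List Int) (vals : PySem.Dict Int Bool) :
    PySem.Dict Int Bool :=
  front.foldl
    (fun d x => d.insert x (
      if x ≥ 375 then decide (cc % 2 = m % 2)
      else if cc = m then false
      else
        let r1 := vals.getD (x + 1) false
        let r2 := vals.getD (x + 3) false
        let r3 := vals.getD (x * 3) false
        if (cc + 1) % 2 = m % 2 then r1 || r2 || r3 else r1 && r2 && r3))
    PySem.Dict.empty

-- B iterates over reversed(frontiers[:-1]) with cc counting down; structural recursion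
-- from the head with cc counting up builds the identical nested composition.
def backB (m : Int) : List (List Int) → Int → PySem.Dict Int Bool
  | [], _ => PySem.Dict.empty
  | [front], cc => lastVals m cc front
  | front :: rest, cc => backStep m cc front (backB m rest (cc + 1))

def f_alt (a : Int) (c : Int) (m : Int) : Bool :=
  let res := fwdB m ((m - c).toNat + 375) [a] c
  (backB m res.1 c).getD a false

-- ===== PRECONDITION & SPEC =====
-- Pre_f excludes only inputs on which A does not return: for a ≤ 0 with c > m the always-×3
-- move keeps a below 375 forever, so the recursion deepens without bound and A raises
-- RecursionError, and for a ≤ 0 with m - c > 900 the ×3 path reaches depth m - c at or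
-- beyond Python's recursion limit (RecursionError); the small margin below the exact limit
-- covers only inputs A could answer after about 3^900 recursive calls.
def Pre_f (a : Int) (c : Int) (m : Int) : Prop := 1 ≤ a ∨ (c ≤ m ∧ m - c ≤ 900)
instance (a : Int) (c : Int) (m : Int) : Decidable (Pre_f a c m) := by unfold Pre_f; infer_instance

def pvWitness_f : Int × Int × Int := (1, 0, 5)

def Spec_f (a : Int) (c : Int) (m : Int) (out : Bool) : Prop := out = f_alt a c m
instance (a : Int) (c : Int) (m : Int) (out : Bool) : Decidable (Spec_f a c m out) := by unfold Spec_f; infer_instance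

-- ===== CLAIM (what is proved, stated in full; the proofs are below) =====
def Claim_equal_f : Prop := ∀ (a : Int) (c : Int) (m : Int), Dom_f a c m → Pre_f a c m → Spec_f a c m (f a c m)

-- ===== LEMMAS AND PROOFS =====

-- One-step equations for A's port.
theorem fGo_ge (m a c : Int) (fuel : Nat) (h : a ≥ 375) :
    fGo m a c fuel = decide (c % 2 = m % 2) := by
  rw [fGo.eq_def]; simp [h]

theorem fGo_base (m a c : Int) (fuel : Nat) (h1 : ¬ a ≥ 375) (h2 : c = m) :
    fGo m a c fuel = false := by
  rw [fGo.eq_def]; simp [h1, h2]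

theorem fGo_step (m a c : Int) (fuel : Nat) (h1 : ¬ a ≥ 375) (h2 : ¬ c = m) :
    fGo m a c (fuel + 1) =
      if (c + 1) % 2 = m % 2 then
        fGo m (a + 1) (c + 1) fuel || fGo m (a + 3) (c + 1) fuel || fGo m (a * 3) (c + 1) fuel
      else
        fGo m (a + 1) (c + 1) fuel && fGo m (a + 3) (c + 1) fuel && fGo m (a * 3) (c + 1) fuel := by
  rw [fGo.eq_def]; simp [h1, h2]

-- LEVEL CHAIN: the shape the forward pass guarantees and the backward pass consumes.
-- Every non-terminal state of a level has its three children in the next level, inner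
-- levels have cost ≠ m, the last level is all-terminal, and every state admits a fuel
-- bound (it is positive, or its level's cost is at most m).
def Chain (m : Int) : List (List Int) → Int → Prop
  | [], _ => True
  | [fr], cc => ∀ x ∈ fr, (375 ≤ x ∨ cc = m) ∧ (1 ≤ x ∨ cc ≤ m)
  | fr :: fr' :: rest, cc =>
      cc ≠ m ∧
      (∀ x ∈ fr, (1 ≤ x ∨ cc ≤ m) ∧
        (x < 375 → (x + 1) ∈ fr' ∧ (x + 3) ∈ fr' ∧ (x * 3) ∈ fr')) ∧
      Chain m (fr' :: rest) (cc + 1)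

theorem mem_childStep_mono (acc : List Int) (x y : Int) (h : y ∈ acc) :
    y ∈ childStep acc x := by
  unfold childStep
  split
  · simp [PySem.Set.mem_add]; tauto
  · exact h

theorem mem_foldl_childStep_mono (l : List Int) (acc : List Int) (y : Int) (h : y ∈ acc) :
    y ∈ l.foldl childStep acc := by
  induction l generalizing acc with
  | nil => exact h
  | cons z l ih => exact ih (childStep acc z) (mem_childStep_mono acc z y h)

theorem children_mem_foldl_childStep (l : List Int) (acc : List Int) (x : Int)
    (hx : x ∈ l) (hlt : x < 375) :
    (x + 1) ∈ l.foldl childStep acc ∧ (x + 3) ∈ l.foldl childStep acc ∧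
    (x * 3) ∈ l.foldl childStep acc := by
  induction l generalizing acc with
  | nil => simp at hx
  | cons z l ih =>
    rcases List.mem_cons.mp hx with hx | hx
    · subst hx
      have h1 : (x + 1) ∈ childStep acc x := by
        unfold childStep; rw [if_pos hlt]; simp [PySem.Set.mem_add]
      have h3 : (x + 3) ∈ childStep acc x := by
        unfold childStep; rw [if_pos hlt]; simp [PySem.Set.mem_add]
      have h9 : (x * 3) ∈ childStep acc x := by
        unfold childStep; rw [if_pos hlt]; simp [PySem.Set.mem_add]
      exact ⟨mem_foldl_childStep_mono l _ _ h1, mem_foldl_childStep_mono l _ _ h3,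
        mem_foldl_childStep_mono l _ _ h9⟩
    · exact ih (childStep acc z) hx

theorem children_mem_nextFrontier (front : List Int) (x : Int) (hx : x ∈ front)
    (hlt : x < 375) :
    (x + 1) ∈ nextFrontier front ∧ (x + 3) ∈ nextFrontier front ∧
    (x * 3) ∈ nextFrontier front :=
  children_mem_foldl_childStep front [] x hx hlt

-- Every element of the next frontier is a child of a non-terminal element of the old one.
theorem mem_childStep_src (acc : List Int) (x y : Int) (h : y ∈ childStep acc x) :
    y ∈ acc ∨ (x < 375 ∧ (y = x + 1 ∨ y = x + 3 ∨ y = x * 3)) := by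
  unfold childStep at h
  by_cases hlt : x < 375
  · rw [if_pos hlt] at h
    simp [PySem.Set.mem_add] at h
    tauto
  · rw [if_neg hlt] at h
    exact Or.inl h

theorem mem_foldl_childStep_src (l : List Int) (acc : List Int) (y : Int)
    (h : y ∈ l.foldl childStep acc) :
    y ∈ acc ∨ ∃ x ∈ l, x < 375 ∧ (y = x + 1 ∨ y = x + 3 ∨ y = x * 3) := by
  induction l generalizing acc with
  | nil => exact Or.inl h
  | cons z l ih =>
    rcases ih (childStep acc z) h with h' | ⟨x, hx, hlt, hy⟩
    · rcases mem_childStep_src acc z y h' with h'' | ⟨hlt, hy⟩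
      · exact Or.inl h''
      · exact Or.inr ⟨z, List.mem_cons_self .., hlt, hy⟩
    · exact Or.inr ⟨x, List.mem_cons_of_mem _ hx, hlt, hy⟩

-- The forward pass produces a Chain when the initial cost is at most m (fuel never runs
-- out: the loop stops at cost m at the latest).
theorem fwd_chain_c (m : Int) :
    ∀ (fuel : Nat) (cur : List Int) (cc : Int), cc ≤ m → m ≤ cc + fuel →
      ∃ rest, (fwdB m fuel cur cc).1 = cur :: rest ∧ Chain m (cur :: rest) cc := by
  intro fuel
  induction fuel with
  | zero =>
    intro cur cc hcc hfuel
    rw [fwdB.eq_def]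
    dsimp only
    have hm : cc = m := by omega
    rw [if_neg (by simp [hm])]
    exact ⟨[], rfl, fun x hx => ⟨Or.inr hm, Or.inr hcc⟩⟩
  | succ fuel ih =>
    intro cur cc hcc hfuel
    rw [fwdB.eq_def]
    dsimp only
    by_cases h : (∃ x ∈ cur, x < 375) ∧ cc ≠ m
    · rw [if_pos h]
      have hlt : cc < m := lt_of_le_of_ne hcc h.2
      obtain ⟨rest, heq, hch⟩ := ih (nextFrontier cur) (cc + 1) (by omega) (by omega)
      refine ⟨nextFrontier cur :: rest, by simp [heq], ?_⟩
      refine ⟨h.2, ?_, heq ▸ hch⟩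
      intro x hx
      exact ⟨Or.inr hcc, fun hxlt => children_mem_nextFrontier cur x hx hxlt⟩
    · rw [if_neg h]
      refine ⟨[], rfl, ?_⟩
      intro x hx
      by_cases hm : cc = m
      · exact ⟨Or.inr hm, Or.inr hcc⟩
      · have hge : 375 ≤ x := by
          by_contra hge
          exact h ⟨⟨x, hx, by omega⟩, hm⟩
        exact ⟨Or.inl hge, Or.inr hcc⟩

-- … and also when every initial state is positive (each move strictly increases a
-- positive state, so after at most 375 levels the whole frontier is terminal).
theorem fwd_chain_a (m : Int) :
    ∀ (fuel : Nat) (lo : Int) (cur : List Int) (cc : Int), 1 ≤ lo →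
      (∀ x ∈ cur, lo ≤ x) → (375 : Int) ≤ lo + fuel →
      ∃ rest, (fwdB m fuel cur cc).1 = cur :: rest ∧ Chain m (cur :: rest) cc := by
  intro fuel
  induction fuel with
  | zero =>
    intro lo cur cc hlo hcur hfuel
    rw [fwdB.eq_def]
    dsimp only
    have hall : ∀ x ∈ cur, 375 ≤ x := fun x hx => by have := hcur x hx; omega
    rw [if_neg (by rintro ⟨⟨x, hx, hxlt⟩, -⟩; exact absurd (hall x hx) (by omega))]
    exact ⟨[], rfl, fun x hx => ⟨Or.inl (hall x hx), Or.inl (by have := hcur x hx; omega)⟩⟩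
  | succ fuel ih =>
    intro lo cur cc hlo hcur hfuel
    rw [fwdB.eq_def]
    dsimp only
    by_cases h : (∃ x ∈ cur, x < 375) ∧ cc ≠ m
    · rw [if_pos h]
      have hnext : ∀ y ∈ nextFrontier cur, lo + 1 ≤ y := by
        intro y hy
        rcases mem_foldl_childStep_src cur [] y hy with h' | ⟨x, hx, hlt, hy'⟩
        · simp at h'
        · have hxlo := hcur x hx
          rcases hy' with h1 | h3 | h9 <;> omega
      obtain ⟨rest, heq, hch⟩ := ih (lo + 1) (nextFrontier cur) (cc + 1) (by omega) hnext (by omega)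
      refine ⟨nextFrontier cur :: rest, by simp [heq], ?_⟩
      refine ⟨h.2, ?_, heq ▸ hch⟩
      intro x hx
      exact ⟨Or.inl (by have := hcur x hx; omega),
        fun hxlt => children_mem_nextFrontier cur x hx hxlt⟩
    · rw [if_neg h]
      refine ⟨[], rfl, ?_⟩
      intro x hx
      have hpos : (1 : Int) ≤ x := by have := hcur x hx; omega
      by_cases hm : cc = m
      · exact ⟨Or.inr hm, Or.inl hpos⟩
      · have hge : 375 ≤ x := by
          by_contra hge
          exact h ⟨⟨x, hx, by omega⟩, hm⟩
        exact ⟨Or.inl hge, Or.inl hpos⟩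

-- Reading back an insert-per-element fold: inside the list the stored value wins.
theorem getD_foldl_insert_fun (g : Int → Bool) :
    ∀ (l : List Int) (d : PySem.Dict Int Bool) (x : Int),
      (l.foldl (fun d x => d.insert x (g x)) d).getD x false =
        if x ∈ l then g x else d.getD x false := by
  intro l
  induction l with
  | nil => intro d x; simp
  | cons y l ih =>
    intro d x
    simp only [List.foldl_cons, ih, PySem.Dict.getD_insert, List.mem_cons]
    by_cases hxl : x ∈ l
    · simp [hxl]
    · by_cases hxy : x = y <;> simp [hxl, hxy]

-- The backward pass computes A's value at every state of the head level of a Chain,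
-- for every fuel the state's bound admits.
theorem back_correct (m : Int) :
    ∀ (fs : List (List Int)) (cc : Int), Chain m fs cc →
      ∀ x ∈ fs.headD [], ∀ fuel : Nat,
        ((1 ≤ x ∧ (375 : Int) ≤ x + fuel) ∨ (cc ≤ m ∧ m ≤ cc + fuel)) →
        (backB m fs cc).getD x false = fGo m x cc fuel := by
  intro fs
  induction fs with
  | nil => intro cc _ x hx; simp at hx
  | cons fr rest ih =>
    intro cc hch x hx fuel hsuff
    simp only [List.headD_cons] at hx
    cases rest with
    | nil =>
      obtain ⟨hterm, -⟩ := hch x hx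
      show (lastVals m cc fr).getD x false = _
      unfold lastVals
      rw [getD_foldl_insert_fun, if_pos hx]
      rcases hterm with hge | hm
      · rw [if_pos hge, fGo_ge m x cc _ hge]
      · by_cases hge : x ≥ 375
        · rw [if_pos hge, fGo_ge m x cc _ hge]
        · rw [if_neg hge, fGo_base m x cc _ hge hm]
    | cons fr' rest' =>
      obtain ⟨hne, hlevel, hch'⟩ := hch
      show (backStep m cc fr (backB m (fr' :: rest') (cc + 1))).getD x false = _
      unfold backStep
      rw [getD_foldl_insert_fun, if_pos hx]
      by_cases hge : x ≥ 375
      · rw [if_pos hge, fGo_ge m x cc _ hge]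
      · obtain ⟨-, hchild⟩ := hlevel x hx
        obtain ⟨hc1, hc3, hc9⟩ := hchild (by omega)
        obtain ⟨g, hg⟩ : ∃ g, fuel = g + 1 := by
          rcases hsuff with ⟨h1, h2⟩ | ⟨h1, h2⟩
          · exact ⟨fuel - 1, by omega⟩
          · have : cc < m := lt_of_le_of_ne h1 hne
            exact ⟨fuel - 1, by omega⟩
        have hs1 : (1 ≤ x + 1 ∧ (375 : Int) ≤ (x + 1) + g) ∨ (cc + 1 ≤ m ∧ m ≤ (cc + 1) + g) := by
          rcases hsuff with ⟨h1, h2⟩ | ⟨h1, h2⟩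
          · left; omega
          · right; have := lt_of_le_of_ne h1 hne; omega
        have hs3 : (1 ≤ x + 3 ∧ (375 : Int) ≤ (x + 3) + g) ∨ (cc + 1 ≤ m ∧ m ≤ (cc + 1) + g) := by
          rcases hsuff with ⟨h1, h2⟩ | ⟨h1, h2⟩
          · left; omega
          · right; have := lt_of_le_of_ne h1 hne; omega
        have hs9 : (1 ≤ x * 3 ∧ (375 : Int) ≤ x * 3 + g) ∨ (cc + 1 ≤ m ∧ m ≤ (cc + 1) + g) := by
          rcases hsuff with ⟨h1, h2⟩ | ⟨h1, h2⟩
          · left; omega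
          · right; have := lt_of_le_of_ne h1 hne; omega
        have e1 := ih (cc + 1) hch' (x + 1) (by simpa using hc1) g hs1
        have e3 := ih (cc + 1) hch' (x + 3) (by simpa using hc3) g hs3
        have e9 := ih (cc + 1) hch' (x * 3) (by simpa using hc9) g hs9
        rw [if_neg hge, if_neg hne, hg, fGo_step m x cc _ hge hne]
        simp only [e1, e3, e9]

-- ===== VERDICT (by name: the statement is the Claim_ definition above) =====
theorem f_spec : Claim_equal_f := by
  intro a c m _ hpre
  unfold Spec_f f f_alt
  have hmain : ∃ rest, (fwdB m ((m - c).toNat + 375) [a] c).1 = [a] :: rest ∧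
      Chain m ([a] :: rest) c := by
    rcases hpre with ha | ⟨hcm, -⟩
    · exact fwd_chain_a m _ a [a] c ha (by simp) (by omega)
    · exact fwd_chain_c m _ [a] c hcm (by omega)
  obtain ⟨rest, heq, hch⟩ := hmain
  show fGo m a c ((m - c).toNat + 375) =
    (backB m (fwdB m ((m - c).toNat + 375) [a] c).1 c).getD a false
  rw [heq]
  refine (back_correct m ([a] :: rest) c hch a (by simp) _ ?_).symm
  rcases hpre with ha | ⟨hcm, -⟩
  · left; constructor <;> omega
  · right; constructor <;> omega
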